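-- pv_equiv track=rewrite | github.com/HarrisonClark/AdventOfCode2021 | 8.py | permInternal
-- ===== SOURCE A (Python) =====
-- def permInternal(perms, rem):
--     newPerms = []
--     for char in rem.pop(0):
--         for perm in perms:
--             if char not in perm:
--                 newPerm = perm.copy()
--                 newPerm.append(char)
--                 newPerms.append(newPerm)
--     if (len(rem) > 0):
--         newPerms = permInternal(newPerms, rem)
--     return newPerms
-- ===== SOURCE B (Python) =====
-- def permInternal(perms, rem):
--     cols = rem
--     out = []
--     def rec(i, chosen):
--         if i < 0:
--             for p in perms:
--                 if all(c not in p for c in chosen):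
--                     out.append(p + chosen)
--         else:
--             for c in cols[i]:
--                 if c not in chosen:
--                     rec(i - 1, [c] + chosen)
--     rec(len(cols) - 1, [])
--     return out
-- ===== Notes on version B (the rewrite author's own statement) =====
-- stated objective: alternative
-- what changed: Replaces A's left-to-right column fold with appended-list accumulation by a right-to-left recursion that builds each suffix of chosen chars (checking pairwise distinctness during descent) and filters/extends the base perms only at the bottom; B reads rem instead of emptying it.
import Mathlib
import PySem

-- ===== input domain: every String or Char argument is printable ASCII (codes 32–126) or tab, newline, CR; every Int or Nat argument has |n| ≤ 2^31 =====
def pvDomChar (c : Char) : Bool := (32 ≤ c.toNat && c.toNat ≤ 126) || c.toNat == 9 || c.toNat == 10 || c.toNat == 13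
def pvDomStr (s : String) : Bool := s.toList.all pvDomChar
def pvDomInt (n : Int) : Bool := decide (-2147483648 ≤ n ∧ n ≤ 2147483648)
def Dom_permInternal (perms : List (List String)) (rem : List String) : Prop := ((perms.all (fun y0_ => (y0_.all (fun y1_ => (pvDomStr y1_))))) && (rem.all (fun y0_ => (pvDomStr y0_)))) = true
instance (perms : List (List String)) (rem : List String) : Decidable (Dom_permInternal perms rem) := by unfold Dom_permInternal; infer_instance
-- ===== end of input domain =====

-- B replaces A's left-to-right column fold by a right-to-left recursion over suffixes of chosen chars; equivalence is about the RETURN value only (A empties rem in place, B does not).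


-- ===== PORT A =====
def permInternal (perms : List (List String)) (rem : List String) : List (List String) :=
  match rem with
  | [] => []   -- Python raises IndexError here (rem.pop(0) on []); excluded by Pre_permInternal
  | col :: rest =>
    -- newPerms = []; for char in col: for perm in perms: if char not in perm: append perm.copy()+[char]
    let newPerms := col.toList.foldl (fun acc c =>
      perms.foldl (fun acc2 perm =>
        if !perm.contains (String.singleton c) then acc2 ++ [perm ++ [String.singleton c]] else acc2) acc) []
    if rest.length > 0 then permInternal newPerms rest else newPerms

-- ===== PORT B =====
-- rec(i, chosen): fuel n = i + 1 (n = 0 ⇔ i < 0, n = m + 1 ⇔ i = m uses cols[m]); `out` is threaded as acc.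
def permRec (perms : List (List String)) (cols : List String) : Nat → List String → List (List String) → List (List String)
  | 0, chosen, acc =>
      perms.foldl (fun a p =>
        if chosen.all (fun c => !p.contains c) then a ++ [p ++ chosen] else a) acc
  | m + 1, chosen, acc =>
      (cols.getD m "").toList.foldl (fun a c =>
        if !chosen.contains (String.singleton c) then permRec perms cols m (String.singleton c :: chosen) a else a) acc

def permInternal_alt (perms : List (List String)) (rem : List String) : List (List String) :=
  permRec perms rem rem.length [] []

-- ===== PRECONDITION & SPEC =====
-- Pre_ excludes rem = [], on which Python A raises IndexError (rem.pop(0) on an empty list).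
def Pre_permInternal (perms : List (List String)) (rem : List String) : Prop := rem ≠ []
instance (perms : List (List String)) (rem : List String) : Decidable (Pre_permInternal perms rem) := by unfold Pre_permInternal; infer_instance
def pvWitness_permInternal : List (List String) × List String := ([["a"]], ["ab"])

def Spec_permInternal (perms : List (List String)) (rem : List String) (out : List (List String)) : Prop := out = permInternal_alt perms rem
instance (perms : List (List String)) (rem : List String) (out : List (List String)) : Decidable (Spec_permInternal perms rem out) := by unfold Spec_permInternal; infer_instance

-- ===== CLAIM (what is proved, stated in full; the proofs are below) =====
def Claim_equal_permInternal : Prop := ∀ (perms : List (List String)) (rem : List String), Dom_permInternal perms rem → Pre_permInternal perms rem → Spec_permInternal perms rem (permInternal perms rem)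

-- ===== LEMMAS AND PROOFS =====

-- one column step of A, written as a comprehension value
def stepF (xs : List (List String)) (col : String) : List (List String) :=
  col.toList.flatMap (fun c =>
    (xs.filter (fun p => !p.contains (String.singleton c))).map (fun p => p ++ [String.singleton c]))

-- A's nested loops over one column build exactly stepF
theorem stepA_eq (perms : List (List String)) (col : String) :
    col.toList.foldl (fun acc c =>
      perms.foldl (fun acc2 perm =>
        if !perm.contains (String.singleton c) then acc2 ++ [perm ++ [String.singleton c]] else acc2) acc) []
    = stepF perms col := by
  have h : ∀ c acc, perms.foldl (fun acc2 perm =>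
      if !perm.contains (String.singleton c) then acc2 ++ [perm ++ [String.singleton c]] else acc2) acc
      = acc ++ (perms.filter (fun p : List String => !p.contains (String.singleton c))).map (fun p => p ++ [String.singleton c]) := by
    intro c acc
    exact PySem.List.foldl_append_if (fun p : List String => !p.contains (String.singleton c)) _ _ _
  calc col.toList.foldl _ []
      = col.toList.foldl (fun acc c => acc ++ (perms.filter (fun p => !p.contains (String.singleton c))).map (fun p => p ++ [String.singleton c])) [] := by
        apply PySem.List.foldl_congr_mem; intro acc c _; exact h c acc
    _ = _ := by
        simpa [stepF] using PySem.List.foldl_append_eq_flatMap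
          (fun c => (perms.filter (fun p => !p.contains (String.singleton c))).map (fun p => p ++ [String.singleton c])) col.toList []

-- A is the left fold of stepF over the columns
theorem A_eq_foldl : ∀ (rem : List String) (perms : List (List String)), rem ≠ [] →
    permInternal perms rem = rem.foldl stepF perms := by
  intro rem
  induction rem with
  | nil => intro _ h; exact absurd rfl h
  | cons col rest ih =>
    intro perms _
    simp only [permInternal, stepA_eq]
    cases rest with
    | nil => simp
    | cons r rs =>
      simp only [List.length_cons, if_pos (Nat.succ_pos _), List.foldl_cons]
      exact ih _ (by simp)

-- extending every candidate by a char already in `chosen` makes the disjointness test fail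
theorem all_append_mem (chosen : List String) (s : String) (h : s ∈ chosen) (q : List String) :
    (chosen.all fun x => !(q ++ [s]).contains x) = false := by
  rw [List.all_eq_false]; exact ⟨s, h, by simp⟩

-- extending by a char not in `chosen` does not change the disjointness test
theorem all_append_not_mem (chosen : List String) (s : String) (h : s ∉ chosen) (q : List String) :
    (chosen.all fun x => !(q ++ [s]).contains x) = (chosen.all fun x => !q.contains x) := by
  induction chosen with
  | nil => rfl
  | cons y ys ih =>
    simp only [List.all_cons, ih (fun hy => h (List.mem_cons_of_mem _ hy))]
    congr 1
    have hy : y ≠ s := fun e => h (e ▸ List.mem_cons_self ..)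
    simp [hy]

-- the per-column heart: B's descent over one column equals A's step, filtered and extended
theorem flat_point (An : List (List String)) (chosen : List String) (l : List Char) :
    (l.flatMap fun c => if !chosen.contains (String.singleton c)
        then (An.filter fun q => (String.singleton c :: chosen).all fun x => !q.contains x).map
              (fun q => q ++ String.singleton c :: chosen)
        else [])
    = ((l.flatMap fun c => (An.filter fun p => !p.contains (String.singleton c)).map
          fun p => p ++ [String.singleton c]).filter fun q => chosen.all fun x => !q.contains x).map
        fun q => q ++ chosen := by
  induction l with
  | nil => simp
  | cons c l ih =>
    simp only [List.flatMap_cons, List.filter_append, List.map_append, ih]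
    congr 1
    by_cases h : String.singleton c ∈ chosen
    · have hz : ((An.filter fun p => !p.contains (String.singleton c)).map
          (fun p => p ++ [String.singleton c])).filter (fun q => chosen.all fun x => !q.contains x) = [] := by
        refine List.filter_eq_nil_iff.mpr ?_
        intro q hq
        rcases List.mem_map.mp hq with ⟨p, _, rfl⟩
        have hfalse := all_append_mem chosen (String.singleton c) h p
        simp only [hfalse]
        simp
      have hcc : chosen.contains (String.singleton c) = true := by simpa using h
      rw [hcc, hz]
      simp
    · rw [List.filter_map]
      have hc : chosen.contains (String.singleton c) = false := by simpa using h
      have hfun : ((fun q => chosen.all fun x => !q.contains x) ∘ fun p => p ++ [String.singleton c])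
          = (fun q : List String => chosen.all fun x => !q.contains x) :=
        funext fun q => all_append_not_mem chosen _ h q
      rw [hfun]
      simp [h, List.filter_filter, List.all_cons, Bool.and_comm, Function.comp_def, List.append_assoc]

-- B's recursion computes: the fold over the first n columns, filtered to be disjoint from `chosen`, each extended by `chosen`
theorem permRec_spec (perms : List (List String)) (cols : List String) :
    ∀ (n : Nat), n ≤ cols.length → ∀ (chosen : List String) (acc : List (List String)),
    permRec perms cols n chosen acc
      = acc ++ (((cols.take n).foldl stepF perms).filter
          (fun q => chosen.all (fun c => !q.contains c))).map (fun q => q ++ chosen) := by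
  intro n
  induction n with
  | zero =>
    intro _ chosen acc
    simpa [permRec] using
      PySem.List.foldl_append_if (fun p : List String => chosen.all (fun c => !p.contains c)) _ _ _
  | succ m ih =>
    intro hn chosen acc
    have hm : m < cols.length := Nat.lt_of_succ_le hn
    have hcol : cols[m] = cols.getD m "" := by
      simp [List.getD, List.getElem?_eq_getElem hm]
    have hfold : (cols.take (m + 1)).foldl stepF perms
        = stepF ((cols.take m).foldl stepF perms) (cols.getD m "") := by
      rw [← hcol]
      conv_lhs => rw [List.take_add_one, List.getElem?_eq_getElem hm]
      rw [show (some cols[m]).toList = [cols[m]] from rfl, List.foldl_append]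
      rfl
    have hbody : ∀ (a : List (List String)) (c : Char), c ∈ (cols.getD m "").toList →
        (if !chosen.contains (String.singleton c) then permRec perms cols m (String.singleton c :: chosen) a else a)
        = a ++ (if !chosen.contains (String.singleton c)
            then (((cols.take m).foldl stepF perms).filter
                    (fun q => (String.singleton c :: chosen).all (fun x => !q.contains x))).map
                  (fun q => q ++ (String.singleton c :: chosen))
            else []) := by
      intro a c _
      by_cases h : String.singleton c ∈ chosen
      · simp [h]
      · have hc : chosen.contains (String.singleton c) = false := by simpa using h
        rw [hc]
        simpa using ih (Nat.le_of_lt hm) (String.singleton c :: chosen) a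
    rw [permRec, PySem.List.foldl_congr_mem _ _ _ _ hbody, PySem.List.foldl_append_eq_flatMap]
    congr 1
    rw [hfold]
    simp only [stepF]
    exact flat_point _ chosen _

-- ===== VERDICT (by name: the statement is the Claim_ definition above) =====
theorem permInternal_spec : Claim_equal_permInternal := by
  intro perms rem _ hpre
  show permInternal perms rem = permInternal_alt perms rem
  rw [A_eq_foldl rem perms hpre]
  unfold permInternal_alt
  rw [permRec_spec perms rem rem.length (Nat.le_refl _) [] []]
  simp
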